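-- pv_equiv track=rewrite | github.com/bukkbeek/CodeBlocks | Other/storyGen.py | _clean_story_text
-- ===== SOURCE A (Python) =====
-- def _clean_story_text(story_text):
--     """Clean the generated story text to remove formatting and metadata"""
--     story_lines = story_text.split('\n')
--     clean_lines = []
--     capture = False
--
--     for line in story_lines:
--         # Skip empty lines at the beginning
--         if not capture and not line.strip():
--             continue
--         # Skip lines that might be part of a setup
--         if not capture and (line.strip().lower().startswith(('title:', 'genre:', 'prompt:', 'story:', '---', '***'))):
--             continue
--         # Start capturing once we've passed potential setup
--         capture = True
--         clean_lines.append(line)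
--
--     # Join the clean lines back together
--     return '\n'.join(clean_lines).strip()
-- ===== SOURCE B (Python) =====
-- def _clean_story_text(story_text):
--     """Clean the generated story text to remove formatting and metadata"""
--     # Peel leading lines off the string itself with partition; the answer is a
--     # stripped suffix of the input -- no line list is ever built or re-joined.
--     rest = story_text
--     while True:
--         head, sep, tail = rest.partition('\n')
--         s = head.strip().lower()
--         if s and not s.startswith(('title:', 'genre:', 'prompt:', 'story:', '---', '***')):
--             return rest.strip()
--         if not sep:
--             return ''
--         rest = tail
-- ===== Notes on version B (the rewrite author's own statement) =====
-- stated objective: alternative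
-- what changed: B never builds the list of lines: it repeatedly partitions the string at its first newline to peel off leading blank/metadata lines and returns a stripped suffix of the original input, instead of A's split/flag-accumulate/rejoin.
import Mathlib
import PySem

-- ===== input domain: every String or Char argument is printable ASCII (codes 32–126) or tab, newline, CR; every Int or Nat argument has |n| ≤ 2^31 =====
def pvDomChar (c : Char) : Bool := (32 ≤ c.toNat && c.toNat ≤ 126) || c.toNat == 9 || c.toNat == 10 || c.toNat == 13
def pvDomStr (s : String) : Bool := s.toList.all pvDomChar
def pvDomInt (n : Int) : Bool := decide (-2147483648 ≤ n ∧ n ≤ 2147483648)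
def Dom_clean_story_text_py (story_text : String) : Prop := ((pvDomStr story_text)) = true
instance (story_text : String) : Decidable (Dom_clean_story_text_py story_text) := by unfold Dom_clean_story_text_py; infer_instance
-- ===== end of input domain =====

-- B never splits the text into a line list: it peels leading setup/blank lines off the
-- string itself with partition('\n') and returns a stripped SUFFIX of the input (simpler
-- decomposition, same cost).

def pvPrefixes : List String := ["title:", "genre:", "prompt:", "story:", "---", "***"]

-- ===== PORT A =====
-- Python tuple-argument startswith = any of the prefixes matches.
def clean_story_text_py (story_text : String) : String :=
  let story_lines := (PySem.Str.split? story_text "\n").getD []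
  let st := story_lines.foldl
    (fun (st : Bool × List String) line =>
      if !st.1 && (PySem.Str.strip line == "") then st
      else if !st.1 &&
          pvPrefixes.any (fun p =>
            PySem.Str.startswith (PySem.Str.lower (PySem.Str.strip line)) p) then st
      else (true, st.2 ++ [line]))
    (false, ([] : List String))
  PySem.Str.strip (PySem.Str.join "\n" st.2)

-- ===== PORT B =====
-- rest.partition('\n'): the chars before the first '\n', and (if a '\n' exists) the chars after it.
def pvPartitionNl : List Char → List Char × Option (List Char)
  | [] => ([], none)
  | c :: r =>
    if c = '\n' then ([], some r)
    else
      let p := pvPartitionNl r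
      (c :: p.1, p.2)

theorem pvPartitionNl_rest_lt (cs r : List Char) (h : (pvPartitionNl cs).2 = some r) :
    r.length < cs.length := by
  induction cs generalizing r with
  | nil => simp [pvPartitionNl] at h
  | cons c cr ih =>
    by_cases hc : c = '\n'
    · simp [pvPartitionNl, hc] at h
      simp [← h]
    · simp [pvPartitionNl, hc] at h
      exact Nat.lt_trans (ih r h) (by simp)

-- the while-loop of Source B, as recursion on the remaining characters
def pvAltGo (cs : List Char) : List Char :=
  -- s = head.strip().lower() is inlined; the loop 'rest = tail' is the recursive call
  if !(PySem.Chars.lower (PySem.Chars.strip (pvPartitionNl cs).1)).isEmpty &&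
      !(pvPrefixes.any (fun p =>
        PySem.Chars.startswith (PySem.Chars.lower (PySem.Chars.strip (pvPartitionNl cs).1)) p.toList)) then
    PySem.Chars.strip cs
  else
    match hr : (pvPartitionNl cs).2 with
    | none => []
    | some rest => pvAltGo rest
termination_by cs.length
decreasing_by exact pvPartitionNl_rest_lt cs rest hr

def clean_story_text_py_alt (story_text : String) : String :=
  String.ofList (pvAltGo story_text.toList)

-- ===== PRECONDITION & SPEC =====
def Spec_clean_story_text_py (story_text : String) (out : String) : Prop := out = clean_story_text_py_alt story_text
instance (story_text : String) (out : String) : Decidable (Spec_clean_story_text_py story_text out) := by unfold Spec_clean_story_text_py; infer_instance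

-- ===== CLAIM (what is proved, stated in full; the proofs are below) =====
def Claim_equal_clean_story_text_py : Prop := ∀ (story_text : String), Dom_clean_story_text_py story_text → Spec_clean_story_text_py story_text (clean_story_text_py story_text)

-- ===== LEMMAS AND PROOFS =====

-- the skip predicate, on char lists
def pvIsSetupCs (l : List Char) : Bool :=
  PySem.Chars.strip l == [] ||
    pvPrefixes.any (fun p =>
      PySem.Chars.startswith (PySem.Chars.lower (PySem.Chars.strip l)) p.toList)

-- simple recursive line splitter, a reference model for splitOn · ['\n']
def pvConsHead (c : Char) : List (List Char) → List (List Char)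
  | [] => [[c]]
  | x :: xs => (c :: x) :: xs

def pvLines : List Char → List (List Char)
  | [] => [[]]
  | c :: r => if c = '\n' then [] :: pvLines r else pvConsHead c (pvLines r)

def pvPrependHead (pre : List Char) : List (List Char) → List (List Char)
  | [] => [pre]
  | x :: xs => (pre ++ x) :: xs

theorem pvLines_ne_nil (cs : List Char) : pvLines cs ≠ [] := by
  cases cs with
  | nil => simp [pvLines]
  | cons c r =>
    by_cases h : c = '\n'
    · simp [pvLines, h]
    · simp only [pvLines, if_neg h]
      cases hl : pvLines r <;> simp [pvConsHead]

theorem pvPrependHead_nil (l : List (List Char)) (h : l ≠ []) : pvPrependHead [] l = l := by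
  cases l with
  | nil => exact absurd rfl h
  | cons x xs => simp [pvPrependHead]

theorem pvSplitOn_go_eq (fuel : Nat) (l cur : List Char) (acc : List (List Char))
    (h : l.length ≤ fuel) :
    PySem.Chars.splitOn.go ['\n'] fuel l cur acc =
      acc.reverse ++ pvPrependHead cur.reverse (pvLines l) := by
  induction fuel generalizing l cur acc with
  | zero =>
    have : l = [] := List.length_eq_zero_iff.mp (Nat.le_zero.mp h)
    subst this
    simp [PySem.Chars.splitOn.go, pvLines, pvPrependHead]
  | succ fuel ih =>
    cases l with
    | nil => simp [PySem.Chars.splitOn.go, pvLines, pvPrependHead]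
    | cons c rest =>
      by_cases hc : c = '\n'
      · have hpre : List.isPrefixOf ['\n'] (c :: rest) = true := by
          simp [List.isPrefixOf, hc]
        rw [PySem.Chars.splitOn.go]
        simp only [hpre, if_pos]
        rw [show List.drop (List.length ['\n']) (c :: rest) = rest by simp]
        rw [ih rest [] (cur.reverse :: acc) (by simpa using Nat.le_of_succ_le_succ (by simpa using h))]
        simp only [List.reverse_cons, List.reverse_nil]
        rw [pvPrependHead_nil _ (pvLines_ne_nil rest)]
        simp [pvLines, hc, pvPrependHead]
      · have hpre : List.isPrefixOf ['\n'] (c :: rest) = false := by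
          simp [List.isPrefixOf]
          exact fun hh => absurd hh.symm hc
        rw [PySem.Chars.splitOn.go]
        simp only [hpre, Bool.false_eq_true, if_false]
        rw [ih rest (c :: cur) acc (Nat.le_of_succ_le_succ (by simpa using h))]
        simp only [pvLines, if_neg hc, List.reverse_cons]
        congr 1
        cases hl : pvLines rest with
        | nil => exact absurd hl (pvLines_ne_nil rest)
        | cons x xs => simp [pvPrependHead, pvConsHead]

theorem pvSplitOn_eq (cs : List Char) : PySem.Chars.splitOn cs ['\n'] = pvLines cs := by
  unfold PySem.Chars.splitOn
  rw [pvSplitOn_go_eq _ _ _ _ (Nat.le_succ _)]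
  simp [pvPrependHead_nil _ (pvLines_ne_nil cs)]

-- pvLines through pvPartitionNl
theorem pvLines_partition (cs : List Char) :
    pvLines cs =
      match (pvPartitionNl cs).2 with
      | none => [(pvPartitionNl cs).1]
      | some r => (pvPartitionNl cs).1 :: pvLines r := by
  induction cs with
  | nil => simp [pvLines, pvPartitionNl]
  | cons c r ih =>
    by_cases hc : c = '\n'
    · simp [pvLines, pvPartitionNl, hc]
    · simp only [pvLines, pvPartitionNl, if_neg hc]
      rw [ih]
      cases hr : (pvPartitionNl r).2 <;> simp [pvConsHead]

-- joining the lines back recovers the text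
theorem pvJoin_consHead (c : Char) (l : List (List Char)) (h : l ≠ []) :
    PySem.Chars.join ['\n'] (pvConsHead c l) = c :: PySem.Chars.join ['\n'] l := by
  cases l with
  | nil => exact absurd rfl h
  | cons x xs =>
    cases xs with
    | nil => simp [pvConsHead, PySem.Chars.join, List.intercalate]
    | cons y ys =>
      simp only [pvConsHead]
      rw [PySem.Chars.join_cons_cons, PySem.Chars.join_cons_cons]
      simp

theorem pvJoin_lines (cs : List Char) : PySem.Chars.join ['\n'] (pvLines cs) = cs := by
  induction cs with
  | nil => simp [pvLines, PySem.Chars.join, List.intercalate]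
  | cons c r ih =>
    by_cases hc : c = '\n'
    · simp only [pvLines, if_pos hc]
      cases hl : pvLines r with
      | nil => exact absurd hl (pvLines_ne_nil r)
      | cons x xs =>
        rw [PySem.Chars.join_cons_cons]
        rw [← hl, ih, hc]
        simp
    · simp only [pvLines, if_neg hc]
      rw [pvJoin_consHead c _ (pvLines_ne_nil r), ih]

-- B's loop equals strip ∘ join ∘ dropWhile over the reference lines
theorem ofList_eq_empty_iff (l : List Char) : (String.ofList l == "") = (l == []) := by
  have h : String.ofList l = "" ↔ l = [] := by
    constructor
    · intro h
      have := congrArg String.toList h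
      simpa using this
    · intro h; subst h; rfl
  rw [Bool.eq_iff_iff]
  simp [h]

-- B's keep condition is the negation of the skip predicate
theorem pvCond (l : List Char) :
    (!(PySem.Chars.lower (PySem.Chars.strip l)).isEmpty &&
      !(pvPrefixes.any (fun p =>
        PySem.Chars.startswith (PySem.Chars.lower (PySem.Chars.strip l)) p.toList))) =
      !pvIsSetupCs l := by
  rw [Bool.eq_iff_iff]
  simp [pvIsSetupCs, PySem.Chars.lower]

theorem pvAltGo_eq (cs : List Char) :
    pvAltGo cs =
      PySem.Chars.strip (PySem.Chars.join ['\n'] ((pvLines cs).dropWhile pvIsSetupCs)) := by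
  induction cs using pvAltGo.induct with
  | case1 x hkeep =>
    rw [pvAltGo, if_pos hkeep]
    rw [pvCond] at hkeep
    have hks : pvIsSetupCs (pvPartitionNl x).1 = false := by
      simpa using hkeep
    have hlines := pvLines_partition x
    cases hr : (pvPartitionNl x).2 with
    | none =>
      rw [hr] at hlines
      dsimp only at hlines
      rw [hlines]
      simp only [List.dropWhile_cons, hks, Bool.false_eq_true, if_false]
      rw [← hlines, pvJoin_lines]
    | some r =>
      rw [hr] at hlines
      dsimp only at hlines
      rw [hlines]
      simp only [List.dropWhile_cons, hks, Bool.false_eq_true, if_false]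
      rw [← hlines, pvJoin_lines]
  | case2 x hskip hnone =>
    rw [pvAltGo, if_neg hskip, hnone]
    rw [pvCond] at hskip
    have hks : pvIsSetupCs (pvPartitionNl x).1 = true := by
      simpa using hskip
    have hlines := pvLines_partition x
    rw [hnone] at hlines
    dsimp only at hlines
    rw [hlines]
    simp only [List.dropWhile_cons, hks, if_true]
    decide
  | case3 x hskip rest hrest ih =>
    rw [pvAltGo, if_neg hskip, hrest]
    rw [pvCond] at hskip
    have hks : pvIsSetupCs (pvPartitionNl x).1 = true := by
      simpa using hskip
    have hlines := pvLines_partition x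
    rw [hrest] at hlines
    dsimp only at hlines
    rw [hlines]
    simp only [List.dropWhile_cons, hks, if_true]
    exact ih

-- the loop body of port A, named for the proofs
def pvStep (st : Bool × List String) (line : String) : Bool × List String :=
  if !st.1 && (PySem.Str.strip line == "") then st
  else if !st.1 &&
      pvPrefixes.any (fun p =>
        PySem.Str.startswith (PySem.Str.lower (PySem.Str.strip line)) p) then st
  else (true, st.2 ++ [line])

def pvIsSetupStr (line : String) : Bool :=
  PySem.Str.strip line == "" ||
    pvPrefixes.any (fun p => PySem.Str.startswith (PySem.Str.lower (PySem.Str.strip line)) p)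

theorem pvLoop_true (ls : List String) (acc : List String) :
    ls.foldl pvStep (true, acc) = (true, acc ++ ls) := by
  induction ls generalizing acc with
  | nil => simp
  | cons l ls ih => simp [pvStep, ih]

theorem pvLoop_false (ls : List String) :
    (ls.foldl pvStep (false, ([] : List String))).2 = ls.dropWhile pvIsSetupStr := by
  induction ls with
  | nil => simp
  | cons l ls ih =>
    by_cases h : pvIsSetupStr l = true
    · have hstep : pvStep (false, []) l = (false, []) := by
        simp only [pvIsSetupStr, Bool.or_eq_true] at h
        unfold pvStep
        simp only [Bool.not_false, Bool.true_and]
        by_cases hb : (PySem.Str.strip l == "") = true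
        · rw [if_pos hb]
        · rcases h with h | h
          · exact absurd h hb
          · rw [if_neg hb, if_pos h]
      simp [List.foldl_cons, hstep, ih, h]
    · have h' := h
      simp only [pvIsSetupStr, Bool.or_eq_true, not_or, Bool.not_eq_true] at h'
      have hstep : pvStep (false, []) l = (true, [l]) := by
        unfold pvStep
        simp only [Bool.not_false, Bool.true_and]
        rw [if_neg (by rw [h'.1]; simp), if_neg (by rw [h'.2]; simp)]
        simp
      simp [List.foldl_cons, hstep, pvLoop_true, h]

-- the two predicates coincide across ofList
theorem pvIsSetup_bridge (l : List Char) : pvIsSetupStr (String.ofList l) = pvIsSetupCs l := by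
  simp [pvIsSetupStr, pvIsSetupCs, PySem.Str.strip, PySem.Str.lower, PySem.Str.startswith,
    ofList_eq_empty_iff]

-- ===== VERDICT (by name: the statement is the Claim_ definition above) =====
theorem clean_story_text_py_spec : Claim_equal_clean_story_text_py := by
  intro s _
  show clean_story_text_py s = clean_story_text_py_alt s
  show PySem.Str.strip (PySem.Str.join "\n"
      (((PySem.Str.split? s "\n").getD []).foldl pvStep (false, [])).2) = _
  rw [pvLoop_false]
  have hsplit : (PySem.Str.split? s "\n").getD [] = (pvLines s.toList).map String.ofList := by
    simp [PySem.Str.split?, PySem.Chars.split?]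
    rw [pvSplitOn_eq]
  rw [hsplit, List.dropWhile_map]
  have hpred : (pvIsSetupStr ∘ String.ofList) = pvIsSetupCs := funext pvIsSetup_bridge
  rw [hpred]
  show _ = String.ofList (pvAltGo s.toList)
  rw [pvAltGo_eq]
  simp only [PySem.Str.strip, PySem.Str.join, PySem.Chars.join, String.toList_ofList]
  have hid : (String.toList ∘ String.ofList) = id := funext (fun x => by simp)
  rw [List.map_map, hid, List.map_id]
  rw [show ("\n" : String).toList = ['\n'] from by decide]
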